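-- pv_equiv track=rewrite | github.com/tsani/coding-cat-public | adjacent-vowels/mutation_4.py | adjacent_vowels
-- ===== SOURCE A (Python) =====
-- def adjacent_vowels(word: str) -> int:
--     count = 0
--     """
--     Remove the upper case possibilities
--     """
--     vowels = ['a', 'e', 'i', 'o', 'u']
--     for index in range(len(word) - 1):
--         if word[index] in vowels and word[index + 1] in vowels:
--             count += 1
--
--     return count
-- ===== SOURCE B (Python) =====
-- def adjacent_vowels(word: str) -> int:
--     # single pass over characters: pairs = (#vowel chars) - (#maximal vowel runs)
--     total = 0
--     runs = 0
--     prev = False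
--     for ch in word:
--         cur = ch in 'aeiou'
--         if cur:
--             total += 1
--             if not prev:
--                 runs += 1
--         prev = cur
--     return total - runs
-- ===== Notes on version B (the rewrite author's own statement) =====
-- stated objective: alternative
-- what changed: B replaces A's index-pair scan over range(len-1) with a run-counting pass over the characters (tracking previous-char vowelness, total vowels and number of maximal vowel runs) and returns total_vowels - num_runs.
import Mathlib
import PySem

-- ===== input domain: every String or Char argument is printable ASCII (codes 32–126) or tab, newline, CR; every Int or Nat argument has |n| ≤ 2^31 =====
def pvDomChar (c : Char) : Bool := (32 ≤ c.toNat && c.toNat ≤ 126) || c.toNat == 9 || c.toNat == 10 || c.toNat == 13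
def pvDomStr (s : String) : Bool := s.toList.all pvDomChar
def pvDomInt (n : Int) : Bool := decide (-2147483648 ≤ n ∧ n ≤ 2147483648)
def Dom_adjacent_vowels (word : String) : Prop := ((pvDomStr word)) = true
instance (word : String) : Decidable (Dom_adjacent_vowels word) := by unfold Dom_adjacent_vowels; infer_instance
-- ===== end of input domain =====

-- B counts adjacent vowel pairs as (total vowel chars) - (number of maximal vowel runs)
-- in one pass, instead of A's index-pair scan over range(len(word)-1); same cost, alternative algorithm.


-- ===== PORT A =====
def adjacent_vowels (word : String) : Int :=
  -- indices in range(len(word)-1) are always in bounds, so word[index] is pyGetD (default never used)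
  (PySem.List.pyRange 0 ((word.toList.length : Int) - 1) 1).foldl
    (fun count index =>
      if (['a', 'e', 'i', 'o', 'u'] : List Char).contains (PySem.List.pyGetD word.toList index ' ')
          && (['a', 'e', 'i', 'o', 'u'] : List Char).contains (PySem.List.pyGetD word.toList (index + 1) ' ')
      then count + 1 else count) 0

-- ===== PORT B =====
def adjacent_vowels_alt (word : String) : Int :=
  let st := word.toList.foldl
    (fun (s : Int × Int × Bool) ch =>
      let cur := PySem.Str.isIn (String.singleton ch) "aeiou"
      let total := if cur then s.1 + 1 else s.1
      let runs := if cur && !s.2.2 then s.2.1 + 1 else s.2.1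
      (total, runs, cur)) (0, 0, false)
  st.1 - st.2.1

-- ===== PRECONDITION & SPEC =====
def Spec_adjacent_vowels (word : String) (out : Int) : Prop := out = adjacent_vowels_alt word
instance (word : String) (out : Int) : Decidable (Spec_adjacent_vowels word out) := by unfold Spec_adjacent_vowels; infer_instance

-- ===== CLAIM (what is proved, stated in full; the proofs are below) =====
def Claim_equal_adjacent_vowels : Prop := ∀ (word : String), Dom_adjacent_vowels word → Spec_adjacent_vowels word (adjacent_vowels word)

-- ===== LEMMAS AND PROOFS =====

def pvIsV (c : Char) : Bool := (['a', 'e', 'i', 'o', 'u'] : List Char).contains c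

-- A's loop step, on the char list with Nat indices
def pvStepA (l : List Char) (c : Int) (k : Nat) : Int :=
  if pvIsV (l.getD k ' ') && pvIsV (l.getD (k + 1) ' ') then c + 1 else c

-- pairs counted with a carried "previous char was a vowel" flag
def pvPairsP : Bool → List Char → Int
  | _, [] => 0
  | p, a :: t => (if p && pvIsV a then 1 else 0) + pvPairsP (pvIsV a) t

def pvVc : List Char → Int
  | [] => 0
  | a :: t => (if pvIsV a then 1 else 0) + pvVc t

def pvRuns : Bool → List Char → Int
  | _, [] => 0
  | p, a :: t => (if pvIsV a && !p then 1 else 0) + pvRuns (pvIsV a) t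

theorem pvStepA_cons (a : Char) (l : List Char) (c : Int) (k : Nat) :
    pvStepA (a :: l) c (k + 1) = pvStepA l c k := by
  simp [pvStepA]

theorem pvFoldA_cons (t : List Char) (a : Char) (c : Int) :
    (List.range ((a :: t).length - 1)).foldl (pvStepA (a :: t)) c
      = c + pvPairsP (pvIsV a) t := by
  induction t generalizing a c with
  | nil => simp [pvPairsP]
  | cons b t' ih =>
    have hlen : (a :: b :: t').length - 1 = ((b :: t').length - 1) + 1 := by
      simp
    rw [hlen, List.range_succ_eq_map, List.foldl_cons, List.foldl_map]
    have hfun : (fun (c : Int) (k : Nat) => pvStepA (a :: b :: t') c (k + 1))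
        = pvStepA (b :: t') := by
      funext c k; exact pvStepA_cons a (b :: t') c k
    simp only [Nat.succ_eq_add_one, hfun]
    rw [ih b (pvStepA (a :: b :: t') c 0)]
    have h0 : pvStepA (a :: b :: t') c 0
        = c + (if pvIsV a && pvIsV b then 1 else 0) := by
      simp [pvStepA]; split <;> simp
    rw [h0]
    show c + (if pvIsV a && pvIsV b then 1 else 0) + pvPairsP (pvIsV b) t'
      = c + pvPairsP (pvIsV a) (b :: t')
    simp [pvPairsP]; ring

theorem pvA_eq (word : String) :
    adjacent_vowels word
      = (List.range (word.toList.length - 1)).foldl (pvStepA word.toList) 0 := by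
  unfold adjacent_vowels
  rw [PySem.List.pyRange_one]
  have hn : (((word.toList.length : Int)) - 1 - 0).toNat = word.toList.length - 1 := by
    omega
  rw [hn, List.foldl_map]
  apply PySem.List.foldl_congr_mem
  intro acc k _
  simp only [zero_add]
  have h2 : PySem.List.pyGetD word.toList ((k : Int) + 1) ' ' = word.toList.getD (k + 1) ' ' := by
    have h1 : ((k : Int) + 1) = ((k + 1 : Nat) : Int) := by push_cast; ring
    rw [h1, PySem.List.pyGetD_natCast]
  simp [pvStepA, pvIsV, h2, PySem.List.pyGetD_natCast, List.getD_eq_getElem?_getD]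

-- B's fold computes (total vowels, runs, last flag) from any starting state
theorem pvFoldB (l : List Char) (t0 r0 : Int) (p : Bool) :
    ∃ q : Bool,
      l.foldl (fun (s : Int × Int × Bool) ch =>
          let cur := pvIsV ch
          let total := if cur then s.1 + 1 else s.1
          let runs := if cur && !s.2.2 then s.2.1 + 1 else s.2.1
          (total, runs, cur)) (t0, r0, p)
        = (t0 + pvVc l, r0 + pvRuns p l, q) := by
  induction l generalizing t0 r0 p with
  | nil => exact ⟨p, by simp [pvVc, pvRuns]⟩
  | cons a t ih =>
    obtain ⟨q, hq⟩ := ih (if pvIsV a then t0 + 1 else t0)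
      (if pvIsV a && !p then r0 + 1 else r0) (pvIsV a)
    refine ⟨q, ?_⟩
    simp only [List.foldl_cons, hq]
    simp [pvVc, pvRuns]
    constructor <;> (split <;> ring)

theorem pvVc_eq (l : List Char) (p : Bool) :
    pvVc l = pvPairsP p l + pvRuns p l := by
  induction l generalizing p with
  | nil => simp [pvVc, pvPairsP, pvRuns]
  | cons a t ih =>
    simp only [pvVc, pvPairsP, pvRuns, ih (pvIsV a)]
    cases h : pvIsV a <;> cases p <;> simp [h] <;> try ring

theorem pvIsIn_eq (ch : Char) :
    PySem.Str.isIn (String.singleton ch) "aeiou" = pvIsV ch := by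
  have h5 : ("aeiou" : String).toList = ['a', 'e', 'i', 'o', 'u'] := by decide
  have hs : (String.singleton ch).toList = [ch] := by simp
  rw [Bool.eq_iff_iff, PySem.Str.isIn_iff_infix, hs, h5]
  constructor
  · intro h
    have hm : ch ∈ (['a', 'e', 'i', 'o', 'u'] : List Char) :=
      List.singleton_sublist.mp h.sublist
    simpa [pvIsV] using hm
  · intro h
    have hm : ch ∈ (['a', 'e', 'i', 'o', 'u'] : List Char) := by
      simpa [pvIsV] using h
    obtain ⟨s, t, hst⟩ := List.append_of_mem hm
    exact ⟨s, t, by simp [hst]⟩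

theorem pvB_eq (word : String) :
    adjacent_vowels_alt word = pvVc word.toList - pvRuns false word.toList := by
  unfold adjacent_vowels_alt
  simp only [pvIsIn_eq]
  obtain ⟨q, hq⟩ := pvFoldB word.toList 0 0 false
  simp only [hq]
  ring

-- ===== VERDICT (by name: the statement is the Claim_ definition above) =====
theorem adjacent_vowels_spec : Claim_equal_adjacent_vowels := by
  intro word _
  unfold Spec_adjacent_vowels
  rw [pvA_eq, pvB_eq]
  generalize word.toList = l
  cases l with
  | nil => simp [pvVc, pvRuns]
  | cons a t =>
    rw [pvFoldA_cons]
    have h := pvVc_eq (a :: t) false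
    have h2 : pvPairsP false (a :: t) = pvPairsP (pvIsV a) t := by
      simp [pvPairsP]
    rw [h2] at h
    omega
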